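-- pv_equiv track=rewrite | github.com/IamBATMAN1313/RBTreeManim | rbtree.py | apply_relative_path
-- ===== SOURCE A (Python) =====
-- def apply_relative_path(root_index, path):
--     """Apply a path of 'L'/'R' moves starting from root_index"""
--     current = root_index
--     for move in path:
--         if move == 'L':
--             current = 2 * current
--         else:  # move == 'R'
--             current = 2 * current + 1
--     return current
-- ===== SOURCE B (Python) =====
-- def apply_relative_path(root_index, path):
--     """Apply a path of 'L'/'R' moves starting from root_index (closed form)."""
--     n = len(path)
--     bits = ''.join('0' if m == 'L' else '1' for m in path)
--     return root_index * 2**n + int(bits or '0', 2)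
-- ===== Notes on version B (the rewrite author's own statement) =====
-- stated objective: faster
-- what changed: Replaces the per-move doubling loop by a closed form: root_index * 2^len(path) plus the binary value of the path read as a bit string (L=0, anything else=1).
import Mathlib
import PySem

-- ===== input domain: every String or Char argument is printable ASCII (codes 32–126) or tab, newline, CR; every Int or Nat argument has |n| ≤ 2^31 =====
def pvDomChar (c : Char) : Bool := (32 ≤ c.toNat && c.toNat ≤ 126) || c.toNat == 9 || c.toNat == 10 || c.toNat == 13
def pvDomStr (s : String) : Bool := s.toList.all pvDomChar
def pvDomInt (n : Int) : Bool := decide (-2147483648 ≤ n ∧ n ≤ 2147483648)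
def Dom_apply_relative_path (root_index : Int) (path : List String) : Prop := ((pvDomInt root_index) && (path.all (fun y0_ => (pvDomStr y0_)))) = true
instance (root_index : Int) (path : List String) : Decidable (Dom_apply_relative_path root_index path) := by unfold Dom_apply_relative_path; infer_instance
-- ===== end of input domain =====

-- B replaces A's per-move doubling loop by a closed form (root_index * 2^n + binary value of the path); objective: simpler.


-- ===== PORT A =====
def apply_relative_path (root_index : Int) (path : List String) : Int :=
  path.foldl (fun current move => if move == "L" then 2 * current else 2 * current + 1) root_index

-- ===== PORT B =====
-- int(bits, 2) on a string of '0'/'1' characters: standard binary-value fold over the characters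
def pvBinVal (cs : List Char) : Int :=
  cs.foldl (fun acc c => 2 * acc + (if c = '1' then 1 else 0)) 0

def apply_relative_path_alt (root_index : Int) (path : List String) : Int :=
  let n := path.length
  let bits := path.map (fun m => if m == "L" then '0' else '1')
  root_index * 2 ^ n + pvBinVal (if bits.isEmpty then ['0'] else bits)

-- ===== PRECONDITION & SPEC =====
def Spec_apply_relative_path (root_index : Int) (path : List String) (out : Int) : Prop := out = apply_relative_path_alt root_index path
instance (root_index : Int) (path : List String) (out : Int) : Decidable (Spec_apply_relative_path root_index path out) := by unfold Spec_apply_relative_path; infer_instance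

-- ===== CLAIM (what is proved, stated in full; the proofs are below) =====
def Claim_equal_apply_relative_path : Prop := ∀ (root_index : Int) (path : List String), Dom_apply_relative_path root_index path → Spec_apply_relative_path root_index path (apply_relative_path root_index path)

-- ===== LEMMAS AND PROOFS =====
lemma pvBinVal_acc (cs : List Char) (a : Int) :
    cs.foldl (fun acc c => 2 * acc + (if c = '1' then 1 else 0)) a
      = a * 2 ^ cs.length + pvBinVal cs := by
  induction cs generalizing a with
  | nil => simp [pvBinVal]
  | cons c cs ih =>
    rw [List.foldl_cons, ih]
    conv_rhs => rw [List.length_cons, pvBinVal, List.foldl_cons, ih]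
    ring

lemma apply_eq (path : List String) (c : Int) :
    apply_relative_path c path = c * 2 ^ path.length + pvBinVal (path.map (fun m => if m == "L" then '0' else '1')) := by
  induction path generalizing c with
  | nil => simp [apply_relative_path, pvBinVal]
  | cons m rest ih =>
    unfold apply_relative_path at ih ⊢
    rw [List.foldl_cons, ih]
    conv_rhs => rw [List.map_cons, List.length_cons, pvBinVal, List.foldl_cons, pvBinVal_acc, List.length_map]
    by_cases h : m == "L" <;> simp only [h, ite_true, ite_false, Bool.false_eq_true] <;> ring_nf <;> simp [pvBinVal]

-- ===== VERDICT (by name: the statement is the Claim_ definition above) =====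
theorem apply_relative_path_spec : Claim_equal_apply_relative_path := by
  intro root_index path _
  unfold Spec_apply_relative_path apply_relative_path_alt
  rw [apply_eq]
  cases path with
  | nil => simp [pvBinVal]
  | cons m rest => simp [List.isEmpty]
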